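-- pv_equiv track=rewrite | github.com/BOLLARESHMITHA/python | day3/std_record_tuple.py | Std_topper_name
-- ===== SOURCE A (Python) =====
-- def Std_topper_name(std_data):
--     max_marks=0
--     for i in range(0,len(std_data)):
--         if(max_marks<std_data[i][2]):
--             max_marks=std_data[i][2]
--     for i in range(0,len(std_data)):
--         if(std_data[i][2]==max_marks):
--             return std_data[i][0]
-- ===== SOURCE B (Python) =====
-- def Std_topper_name(std_data):
--     # single pass: track best marks (starting at 0, as A does) and the first name attaining it
--     best_name, best = None, 0
--     for rec in std_data:
--         marks = rec[2]
--         if marks > best or (best_name is None and marks == best):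
--             best_name, best = rec[0], marks
--     return best_name
-- ===== Notes on version B (the rewrite author's own statement) =====
-- stated objective: simpler
-- what changed: A makes two indexed passes (first compute max_marks starting from 0, then rescan for the first student whose marks equal it); B is a single pass over the list that keeps the running best marks and the first name attaining it together.
-- outside the precondition, e.g. on Std_topper_name([('a', '1', -1)]): A returns None, B returns None
import Mathlib
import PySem

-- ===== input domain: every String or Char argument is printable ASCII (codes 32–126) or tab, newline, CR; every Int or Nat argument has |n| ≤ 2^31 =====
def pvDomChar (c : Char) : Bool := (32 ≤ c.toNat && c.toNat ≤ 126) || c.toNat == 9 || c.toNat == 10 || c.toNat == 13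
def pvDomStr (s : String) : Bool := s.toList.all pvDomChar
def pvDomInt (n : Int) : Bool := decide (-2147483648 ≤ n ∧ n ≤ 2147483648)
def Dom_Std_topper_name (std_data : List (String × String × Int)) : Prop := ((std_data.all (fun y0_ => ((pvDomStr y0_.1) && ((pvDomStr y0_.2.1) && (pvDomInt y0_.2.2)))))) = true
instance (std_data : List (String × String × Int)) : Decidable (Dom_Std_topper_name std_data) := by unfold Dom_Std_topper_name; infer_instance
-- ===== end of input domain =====

-- B merges A's two index loops into one pass over the list that tracks the running max and its first name together (objective: simpler).

-- ===== PORT A =====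
-- first loop: for i in range(0,len(std_data)): if max_marks < std_data[i][2]: max_marks = std_data[i][2]
def aMaxLoop (std_data : List (String × String × Int)) : List Int → Int → Int
  | [], m => m
  | i :: is, m =>
    match PySem.List.pyGet? std_data i with
    | some p => aMaxLoop std_data is (if m < p.2.2 then p.2.2 else m)
    | none => m  -- unreachable: i is drawn from range(len(std_data))

-- second loop: for i in range(0,len(std_data)): if std_data[i][2]==max_marks: return std_data[i][0]
def aFindLoop (std_data : List (String × String × Int)) (m : Int) : List Int → Option String
  | [] => none  -- falling off the end: Python returns None (excluded by Pre_)
  | i :: is =>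
    match PySem.List.pyGet? std_data i with
    | some p => if p.2.2 = m then some p.1 else aFindLoop std_data m is
    | none => none  -- unreachable

def Std_topper_name (std_data : List (String × String × Int)) : String :=
  let max_marks := aMaxLoop std_data (PySem.List.pyRange 0 std_data.length 1) 0
  (aFindLoop std_data max_marks (PySem.List.pyRange 0 std_data.length 1)).getD ""

-- ===== PORT B =====
def bLoop : List (String × String × Int) → Option String → Int → Option String
  | [], best_name, _ => best_name
  | rec :: t, best_name, best =>
    if best < rec.2.2 ∨ (best_name = none ∧ rec.2.2 = best) then bLoop t (some rec.1) rec.2.2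
    else bLoop t best_name best

def Std_topper_name_alt (std_data : List (String × String × Int)) : String :=
  (bLoop std_data none 0).getD ""

-- ===== PRECONDITION & SPEC =====
-- Pre_ excludes the inputs with no student of nonnegative marks (empty list or all marks < 0), on which
-- Python A runs off its second loop and returns None, not a string; B returns None there too.
def Pre_Std_topper_name (std_data : List (String × String × Int)) : Prop :=
  ∃ p ∈ std_data, 0 ≤ p.2.2
instance (std_data : List (String × String × Int)) : Decidable (Pre_Std_topper_name std_data) := by
  unfold Pre_Std_topper_name; infer_instance

def pvWitness_Std_topper_name : (List (String × String × Int)) := [("amy", "1", 35), ("bob", "2", 35)]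

def Spec_Std_topper_name (std_data : List (String × String × Int)) (out : String) : Prop := out = Std_topper_name_alt std_data
instance (std_data : List (String × String × Int)) (out : String) : Decidable (Spec_Std_topper_name std_data out) := by unfold Spec_Std_topper_name; infer_instance

-- ===== CLAIM (what is proved, stated in full; the proofs are below) =====
def Claim_equal_Std_topper_name : Prop := ∀ (std_data : List (String × String × Int)), Dom_Std_topper_name std_data → Pre_Std_topper_name std_data → Spec_Std_topper_name std_data (Std_topper_name std_data)

-- ===== LEMMAS AND PROOFS =====

-- the running-max step both programs perform
def maxStep (m : Int) (p : String × String × Int) : Int := if m < p.2.2 then p.2.2 else m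

theorem le_foldl_maxStep (l : List (String × String × Int)) (b : Int) :
    b ≤ l.foldl maxStep b := by
  induction l generalizing b with
  | nil => simp
  | cons q t ih =>
    simp only [List.foldl_cons]
    refine le_trans ?_ (ih (maxStep b q))
    unfold maxStep; split <;> omega

-- either nothing in l exceeds b, or some element of l strictly above b attains the running max
theorem attains_foldl_maxStep (l : List (String × String × Int)) (b : Int) :
    l.foldl maxStep b = b ∨ ∃ q ∈ l, b < q.2.2 ∧ q.2.2 = l.foldl maxStep b := by
  induction l generalizing b with
  | nil => left; rfl
  | cons a t ih =>
    simp only [List.foldl_cons]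
    by_cases hab : b < a.2.2
    · right
      have hstep : maxStep b a = a.2.2 := by unfold maxStep; simp [hab]
      simp only [hstep]
      rcases ih a.2.2 with h | ⟨q, hq, h1, h2⟩
      · exact ⟨a, by simp, hab, h.symm⟩
      · exact ⟨q, by simp [hq], by omega, h2⟩
    · have hstep : maxStep b a = b := by unfold maxStep; simp [hab]
      simp only [hstep]
      rcases ih b with h | ⟨q, hq, h1, h2⟩
      · left; exact h
      · right; exact ⟨q, by simp [hq], h1, h2⟩

theorem find?_congr_mem {α : Type} (l : List α) (p q : α → Bool)
    (h : ∀ x ∈ l, p x = q x) : l.find? p = l.find? q := by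
  induction l with
  | nil => rfl
  | cons a t ih =>
    simp only [List.find?_cons]
    rw [h a (by simp)]
    cases q a <;> simp_all

-- ---- A-side: the two range(len) loops are folds / find? over the list ----

theorem aMax_range (suf pre : List (String × String × Int)) (m : Int) :
    aMaxLoop (pre ++ suf) (PySem.List.pyRange (pre.length : Int) ((pre ++ suf).length : Int) 1) m
      = suf.foldl maxStep m := by
  induction suf generalizing pre m with
  | nil =>
    rw [PySem.List.pyRange_one_eq_nil (by simp)]
    rfl
  | cons q t ih =>
    rw [PySem.List.pyRange_one_cons (by simp)]
    show aMaxLoop (pre ++ q :: t) (_ :: _) m = _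
    rw [aMaxLoop]
    rw [PySem.List.pyGet?_append_length]
    have h2 : pre ++ q :: t = (pre ++ [q]) ++ t := by simp
    have h3 : ((pre.length : Int) + 1) = ((pre ++ [q]).length : Int) := by simp
    simp only [List.foldl_cons]
    rw [h2, h3, ih (pre ++ [q])]
    rfl

theorem aFind_range (suf pre : List (String × String × Int)) (m : Int) :
    aFindLoop (pre ++ suf) m (PySem.List.pyRange (pre.length : Int) ((pre ++ suf).length : Int) 1)
      = (suf.find? (fun p => decide (p.2.2 = m))).map (·.1) := by
  induction suf generalizing pre with
  | nil =>
    rw [PySem.List.pyRange_one_eq_nil (by simp)]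
    rfl
  | cons q t ih =>
    rw [PySem.List.pyRange_one_cons (by simp)]
    rw [aFindLoop]
    rw [PySem.List.pyGet?_append_length]
    simp only [List.find?_cons]
    by_cases hq : q.2.2 = m
    · simp [hq]
    · have h2 : pre ++ q :: t = (pre ++ [q]) ++ t := by simp
      have h3 : ((pre.length : Int) + 1) = ((pre ++ [q]).length : Int) := by simp
      simp only [hq]
      rw [h2, h3, ih (pre ++ [q])]
      simp

theorem A_char (l : List (String × String × Int)) :
    Std_topper_name l
      = ((l.find? (fun p => decide (p.2.2 = l.foldl maxStep 0))).map (·.1)).getD "" := by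
  have h1 := aMax_range l [] 0
  have h2 := aFind_range l [] (l.foldl maxStep 0)
  simp only [List.nil_append, List.length_nil, Int.natCast_zero] at h1 h2
  show (aFindLoop l (aMaxLoop l (PySem.List.pyRange 0 l.length 1) 0) (PySem.List.pyRange 0 l.length 1)).getD "" = _
  rw [h1, h2]

-- ---- B-side: the single pass computes the first name attaining the running max ----

theorem pred_drop_lt (b M x : Int) (hb : b < M) :
    (decide (b < x) && decide (x = M)) = decide (x = M) := by
  by_cases hx : x = M
  · subst hx; simp [hb]
  · simp [hx]

theorem bLoop_some (t : List (String × String × Int)) (n : String) (b : Int) :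
    bLoop t (some n) b
      = some (((t.find? (fun q => decide (b < q.2.2) && decide (q.2.2 = t.foldl maxStep b))).map (·.1)).getD n) := by
  induction t generalizing n b with
  | nil => rfl
  | cons a t ih =>
    rw [bLoop]
    simp only [List.foldl_cons, List.find?_cons]
    by_cases hab : b < a.2.2
    · rw [if_pos (Or.inl hab)]
      rw [ih]
      have hstep : maxStep b a = a.2.2 := by unfold maxStep; simp [hab]
      simp only [hstep]
      by_cases he : a.2.2 = t.foldl maxStep a.2.2
      · -- a itself attains the max: the B-loop keeps a, A's find? stops at a
        rw [show (decide (b < a.2.2) && decide (a.2.2 = t.foldl maxStep a.2.2)) = true by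
          simp only [Bool.and_eq_true, decide_eq_true_eq]; exact ⟨hab, he⟩]
        have hnone : t.find? (fun q => decide (a.2.2 < q.2.2) && decide (q.2.2 = t.foldl maxStep a.2.2)) = none := by
          rw [List.find?_eq_none]
          intro x hx
          simp only [Bool.and_eq_true, decide_eq_true_eq, not_and]
          intro h1 h2; omega
        simp [hnone]
      · have hlt : a.2.2 < t.foldl maxStep a.2.2 := by
          have := le_foldl_maxStep t a.2.2; omega
        rw [show (decide (b < a.2.2) && decide (a.2.2 = t.foldl maxStep a.2.2)) = false by
          simp only [Bool.and_eq_false_iff, decide_eq_false_iff_not]; tauto]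
        have hcg : t.find? (fun q => decide (a.2.2 < q.2.2) && decide (q.2.2 = t.foldl maxStep a.2.2))
            = t.find? (fun q => decide (b < q.2.2) && decide (q.2.2 = t.foldl maxStep a.2.2)) := by
          apply find?_congr_mem
          intro x hx
          rw [pred_drop_lt _ _ _ hlt, pred_drop_lt _ _ _ (by omega : b < t.foldl maxStep a.2.2)]
        rw [hcg]
        rcases attains_foldl_maxStep t a.2.2 with h | ⟨q, hq, h1, h2⟩
        · omega
        · have hsome : (t.find? (fun q => decide (b < q.2.2) && decide (q.2.2 = t.foldl maxStep a.2.2))).isSome := by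
            refine List.find?_isSome.mpr ⟨q, hq, ?_⟩
            simp only [Bool.and_eq_true, decide_eq_true_eq]
            exact ⟨by omega, h2⟩
          obtain ⟨x, hx⟩ := Option.isSome_iff_exists.mp hsome
          simp [hx]
    · rw [if_neg (by simp only [not_or, not_and]; exact ⟨hab, fun h => absurd h (Option.some_ne_none n)⟩)]
      rw [ih]
      have hstep : maxStep b a = b := by unfold maxStep; simp [hab]
      simp only [hstep]
      rw [show (decide (b < a.2.2) && decide (a.2.2 = t.foldl maxStep b)) = false by
        simp only [Bool.and_eq_false_iff, decide_eq_false_iff_not]; tauto]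

theorem B_char (l : List (String × String × Int)) :
    bLoop l none 0 = (l.find? (fun p => decide (p.2.2 = l.foldl maxStep 0))).map (·.1) := by
  induction l with
  | nil => rfl
  | cons a t ih =>
    rw [bLoop]
    simp only [List.foldl_cons, List.find?_cons]
    by_cases h0 : 0 ≤ a.2.2
    · rw [if_pos (by refine (lt_or_eq_of_le h0).imp id fun h => ⟨by trivial, h.symm⟩)]
      rw [bLoop_some]
      have hstep : maxStep 0 a = a.2.2 := by
        unfold maxStep
        rcases lt_or_eq_of_le h0 with h | h
        · simp [h]
        · simp [← h]
      simp only [hstep]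
      by_cases he : a.2.2 = t.foldl maxStep a.2.2
      · rw [show (decide (a.2.2 = t.foldl maxStep a.2.2)) = true by
          simp only [decide_eq_true_eq]; exact he]
        have hnone : t.find? (fun q => decide (a.2.2 < q.2.2) && decide (q.2.2 = t.foldl maxStep a.2.2)) = none := by
          rw [List.find?_eq_none]
          intro x hx
          simp only [Bool.and_eq_true, decide_eq_true_eq, not_and]
          intro h1 h2; omega
        simp [hnone]
      · have hlt : a.2.2 < t.foldl maxStep a.2.2 := by
          have := le_foldl_maxStep t a.2.2; omega
        rw [show (decide (a.2.2 = t.foldl maxStep a.2.2)) = false by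
          simp only [decide_eq_false_iff_not]; exact he]
        have hcg : t.find? (fun q => decide (a.2.2 < q.2.2) && decide (q.2.2 = t.foldl maxStep a.2.2))
            = t.find? (fun q => decide (q.2.2 = t.foldl maxStep a.2.2)) := by
          apply find?_congr_mem
          intro x hx
          rw [pred_drop_lt _ _ _ hlt]
        rw [hcg]
        rcases attains_foldl_maxStep t a.2.2 with h | ⟨q, hq, h1, h2⟩
        · omega
        · have hsome : (t.find? (fun q => decide (q.2.2 = t.foldl maxStep a.2.2))).isSome := by
            refine List.find?_isSome.mpr ⟨q, hq, ?_⟩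
            simp only [decide_eq_true_eq]
            exact h2
          obtain ⟨x, hx⟩ := Option.isSome_iff_exists.mp hsome
          simp [hx]
    · rw [if_neg (by rintro (h | ⟨_, h⟩) <;> omega)]
      rw [ih]
      have hstep : maxStep 0 a = 0 := by unfold maxStep; simp; omega
      simp only [hstep]
      rw [show (decide (a.2.2 = t.foldl maxStep 0)) = false by
        have := le_foldl_maxStep t 0
        simp only [decide_eq_false_iff_not]; omega]

-- ===== VERDICT (by name: the statement is the Claim_ definition above) =====
theorem Std_topper_name_spec : Claim_equal_Std_topper_name := by
  intro l _ _
  show Std_topper_name l = Std_topper_name_alt l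
  rw [A_char]
  unfold Std_topper_name_alt
  rw [B_char]
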